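-- pv_equiv track=rewrite | github.com/Jee-9/Algorithm | 혼자 놀기의 달인.py | work
-- ===== SOURCE A (Python) =====
-- def work(left_time, stucks, success):
--     del_list = []
--     for i, stuck in enumerate(list(reversed(stucks))):
--         if stuck[1] > left_time:
--             stuck[1] = stuck[1] - left_time
--             break
--         elif stuck[1] == left_time:
--             del_list.append(stuck[0])
--             break
--         else:
--             del_list.append(stuck[0])
--             left_time = left_time - stuck[1]
--
--     for d in del_list:
--         stucks.pop()
--         success.append(d)
--
--     return stucks, success
-- ===== SOURCE B (Python) =====
-- def work(left_time, stucks, success):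
--     while stucks:
--         t = stucks[-1][1]
--         if t > left_time:
--             stucks[-1][1] = t - left_time
--             break
--         success.append(stucks.pop()[0])
--         if t == left_time:
--             break
--         left_time -= t
--     return stucks, success
-- ===== Notes on version B (the rewrite author's own statement) =====
-- stated objective: simpler
-- what changed: Replaces A's two-pass structure (build del_list over a reversed copy, then pop once per collected id) with a single while-loop that pops completed items from the end inline and updates the boundary item in place.
-- outside the precondition, e.g. on work(5, [[9], [1, 10]], []): A returns ([[9], [1, 5]], []), B returns ([[9], [1, 5]], [])
import Mathlib
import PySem

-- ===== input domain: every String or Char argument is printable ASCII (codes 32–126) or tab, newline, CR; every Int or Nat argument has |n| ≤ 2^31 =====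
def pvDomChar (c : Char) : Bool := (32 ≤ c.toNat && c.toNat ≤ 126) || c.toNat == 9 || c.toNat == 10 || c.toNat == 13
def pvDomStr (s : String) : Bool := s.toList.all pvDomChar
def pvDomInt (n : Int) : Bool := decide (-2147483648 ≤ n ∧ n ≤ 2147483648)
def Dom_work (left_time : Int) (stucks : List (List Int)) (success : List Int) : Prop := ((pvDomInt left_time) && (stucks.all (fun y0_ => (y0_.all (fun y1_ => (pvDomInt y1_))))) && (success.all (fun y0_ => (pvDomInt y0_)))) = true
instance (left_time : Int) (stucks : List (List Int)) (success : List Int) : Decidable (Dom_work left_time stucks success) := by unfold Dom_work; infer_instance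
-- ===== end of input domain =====

-- B replaces A's two-pass 'collect del_list over a reversed copy, then pop once per id'
-- with one while-loop that pops completed items inline (objective: simpler).
-- Both Pythons mutate stucks/success in place in the same way; the theorem is about the return value.

-- ===== PORT A =====
-- the for-loop over list(reversed(stucks)): returns (reversed stucks with the boundary
-- item's [1] updated in place, del_list)
def workLoopA (left_time : Int) (r : List (List Int)) (del_list : List Int) :
    List (List Int) × List Int :=
  match r with
  | [] => ([], del_list)
  | stuck :: rest =>
    match PySem.List.pyGet? stuck 1 with
    | none => (stuck :: rest, del_list)   -- IndexError in Python (outside Pre_work)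
    | some t =>
      if t > left_time then ((PySem.List.pySetD stuck 1 (t - left_time)) :: rest, del_list)
      else if t = left_time then (stuck :: rest, del_list ++ [PySem.List.pyGetD stuck 0 0])
      else
        let p := workLoopA (left_time - t) rest (del_list ++ [PySem.List.pyGetD stuck 0 0])
        (stuck :: p.1, p.2)

-- the second loop: for d in del_list: stucks.pop(); success.append(d)
def workPopLoop (stucks : List (List Int)) (del_list : List Int) (success : List Int) :
    List (List Int) × List Int :=
  match del_list with
  | [] => (stucks, success)
  | d :: ds => workPopLoop stucks.dropLast ds (success ++ [d])

def work (left_time : Int) (stucks : List (List Int)) (success : List Int) :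
    List (List Int) × List Int :=
  let p := workLoopA left_time stucks.reverse []
  workPopLoop p.1.reverse p.2 success

-- ===== PORT B =====
-- the while-loop: examine stucks[-1]; pop completed items inline, update the boundary item
def work_alt (left_time : Int) (stucks : List (List Int)) (success : List Int) :
    List (List Int) × List Int :=
  if stucks = [] then (stucks, success)
  else
    match PySem.List.pyGet? stucks (-1) with
    | none => (stucks, success)           -- unreachable: stucks ≠ []
    | some last =>
      match PySem.List.pyGet? last 1 with
      | none => (stucks, success)         -- IndexError in Python (outside Pre_work)
      | some t =>
        if t > left_time then (stucks.dropLast ++ [PySem.List.pySetD last 1 (t - left_time)], success)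
        else
          let success' := success ++ [PySem.List.pyGetD last 0 0]
          if t = left_time then (stucks.dropLast, success')
          else work_alt (left_time - t) stucks.dropLast success'
termination_by stucks.length
decreasing_by
  simpa [List.length_dropLast] using Nat.sub_lt (List.length_pos_iff.mpr (by assumption)) one_pos

-- ===== PRECONDITION & SPEC =====
-- Pre_work: every inner list has length ≥ 2 (stuck[0]/stuck[1] are accessed; shorter lists
-- raise IndexError when visited). This is slightly narrower than A's exact domain: a short
-- inner list that the loop never reaches (the break fires first) is also excluded.
def Pre_work (left_time : Int) (stucks : List (List Int)) (success : List Int) : Prop :=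
  ∀ s ∈ stucks, 2 ≤ s.length
instance (left_time : Int) (stucks : List (List Int)) (success : List Int) : Decidable (Pre_work left_time stucks success) := by unfold Pre_work; infer_instance
def pvWitness_work : Int × List (List Int) × List Int := (5, [[1, 2], [2, 10]], [7])

def Spec_work (left_time : Int) (stucks : List (List Int)) (success : List Int) (out : List (List Int) × List Int) : Prop := out = work_alt left_time stucks success
instance (left_time : Int) (stucks : List (List Int)) (success : List Int) (out : List (List Int) × List Int) : Decidable (Spec_work left_time stucks success out) := by unfold Spec_work; infer_instance

-- ===== CLAIM (what is proved, stated in full; the proofs are below) =====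
def Claim_equal_work : Prop := ∀ (left_time : Int) (stucks : List (List Int)) (success : List Int), Dom_work left_time stucks success → Pre_work left_time stucks success → Spec_work left_time stucks success (work left_time stucks success)

-- ===== LEMMAS AND PROOFS =====

theorem workPopLoop_cons (st : List (List Int)) (d : Int) (ds : List Int) (suc : List Int) :
    workPopLoop st (d :: ds) suc = workPopLoop st.dropLast ds (suc ++ [d]) := rfl

-- accumulator lemma for A's first loop
theorem workLoopA_acc (left_time : Int) (r : List (List Int)) (del_list : List Int) :
    workLoopA left_time r del_list =
      ((workLoopA left_time r []).1, del_list ++ (workLoopA left_time r []).2) := by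
  induction r generalizing left_time del_list with
  | nil => simp [workLoopA]
  | cons s rest ih =>
    simp only [workLoopA]
    cases h : PySem.List.pyGet? s 1 with
    | none => simp
    | some t =>
      simp only
      split_ifs with h1 h2
      · simp
      · simp
      · have e1 := ih (left_time - t) (del_list ++ [PySem.List.pyGetD s 0 0])
        have e2 := ih (left_time - t) [PySem.List.pyGetD s 0 0]
        simp [e1, e2]

theorem work_main (r : List (List Int)) :
    ∀ (left_time : Int) (success : List Int), (∀ s ∈ r, 2 ≤ s.length) →
      workPopLoop ((workLoopA left_time r []).1).reverse (workLoopA left_time r []).2 success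
        = work_alt left_time r.reverse success := by
  induction r with
  | nil => intro lt success _; simp [workLoopA, workPopLoop, work_alt]
  | cons s rest ih =>
    intro lt success hlen
    have hs : 2 ≤ s.length := hlen s (List.mem_cons_self ..)
    obtain ⟨a, b, s'', rfl⟩ : ∃ a b s'', s = a :: b :: s'' := by
      match s, hs with | a :: b :: s'', _ => exact ⟨a, b, s'', rfl⟩
    have hget : PySem.List.pyGet? (a :: b :: s'') 1 = some b := by
      simp [PySem.List.pyGet?, PySem.List.pyIdx?]
    have hne : rest.reverse ++ [a :: b :: s''] ≠ [] := by simp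
    rw [work_alt]
    simp only [List.reverse_cons, if_neg hne, PySem.List.pyGet?_neg_one_append_singleton,
      List.dropLast_concat]
    rw [workLoopA]
    simp only [hget]
    split_ifs with h1 h2
    · -- boundary item: t > left_time
      simp [workPopLoop]
    · -- t = left_time
      simp [workPopLoop]
    · -- t < left_time: consume and recurse
      rw [workLoopA_acc]
      simp only [List.reverse_cons, List.nil_append, List.singleton_append]
      rw [workPopLoop_cons, List.dropLast_concat]
      exact ih (lt - b) (success ++ [PySem.List.pyGetD (a :: b :: s'') 0 0])
        (fun x hx => hlen x (List.mem_cons_of_mem _ hx))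

-- ===== VERDICT (by name: the statement is the Claim_ definition above) =====
theorem work_spec : Claim_equal_work := by
  intro left_time stucks success _ hpre
  unfold Spec_work work
  have := work_main stucks.reverse left_time success
    (fun s hs => hpre s (List.mem_reverse.mp hs))
  simpa using this
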